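-- pv_equiv track=rewrite | github.com/Zainab19hm/library-management-system | scripts/generate_assignment_pdf.py | build_pages
-- ===== SOURCE A (Python) =====
-- PAGE_HEIGHT = 842
--
-- MARGIN = 50
--
-- FONT_SIZE = 11
--
-- LINE_HEIGHT = 14
--
-- def escape_pdf_text(text: str) -> str:
--     return text.replace('\\', '\\\\').replace('(', '\\(').replace(')', '\\)')
--
-- def build_pages(lines):
--     pages = []
--     y = PAGE_HEIGHT - MARGIN
--     current = []
--
--     for line in lines:
--         if y < MARGIN:
--             pages.append(current)
--             current = []
--             y = PAGE_HEIGHT - MARGIN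
--
--         escaped = escape_pdf_text(line)
--         current.append(f"BT /F1 {FONT_SIZE} Tf 1 0 0 1 {MARGIN} {y} Tm ({escaped}) Tj ET")
--         y -= LINE_HEIGHT
--
--     if current:
--         pages.append(current)
--
--     return pages
-- ===== SOURCE B (Python) =====
-- PAGE_HEIGHT = 842
-- MARGIN = 50
-- FONT_SIZE = 11
-- LINE_HEIGHT = 14
--
-- def escape_pdf_text(text: str) -> str:
--     return text.replace('\\', '\\\\').replace('(', '\\(').replace(')', '\\)')
--
-- def build_pages(lines):
--     cap = (PAGE_HEIGHT - 2 * MARGIN) // LINE_HEIGHT + 1  # 54 lines fit on a page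
--     top = PAGE_HEIGHT - MARGIN
--     return [
--         [f"BT /F1 {FONT_SIZE} Tf 1 0 0 1 {MARGIN} {top - i * LINE_HEIGHT} Tm ({escape_pdf_text(line)}) Tj ET"
--          for i, line in enumerate(lines[start:start + cap])]
--         for start in range(0, len(lines), cap)
--     ]
-- ===== Notes on version B (the rewrite author's own statement) =====
-- stated objective: simpler
-- what changed: Replaces A's stateful y-accumulator loop with a page-flush guard by a closed-form per-page capacity (54 lines) and slicing the input into consecutive chunks, emitting y positions by index.
import Mathlib
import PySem

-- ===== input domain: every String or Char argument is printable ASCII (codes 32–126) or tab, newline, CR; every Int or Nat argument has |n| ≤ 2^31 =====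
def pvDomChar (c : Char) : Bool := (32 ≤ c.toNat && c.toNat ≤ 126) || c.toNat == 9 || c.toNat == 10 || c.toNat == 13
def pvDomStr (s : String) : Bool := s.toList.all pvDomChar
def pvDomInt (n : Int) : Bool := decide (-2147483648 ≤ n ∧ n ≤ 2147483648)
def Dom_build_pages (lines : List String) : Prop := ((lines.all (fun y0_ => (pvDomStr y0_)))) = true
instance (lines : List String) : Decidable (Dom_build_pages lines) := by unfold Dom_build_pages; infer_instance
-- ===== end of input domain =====

-- B replaces A's stateful y-accumulator-and-page-flush loop by a closed-form capacity
-- (54 lines per page) with slicing into chunks and indexed y emission; objective: simpler.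

-- ===== PORT A =====
-- shared module helper escape_pdf_text, and the f-string both Pythons emit
def escape_pdf_text (text : String) : String :=
  PySem.Str.replace (PySem.Str.replace (PySem.Str.replace text "\\" "\\\\") "(" "\\(") ")" "\\)"

def pvFmt (line : String) (y : Int) : String :=
  "BT /F1 11 Tf 1 0 0 1 50 " ++ PySem.Int.toStr y ++ " Tm (" ++ escape_pdf_text line ++ ") Tj ET"

-- A's loop: state (pages, y, current)
def buildLoopA : List String → List (List String) → Int → List String →
    List (List String) × Int × List String
  | [], pages, y, current => (pages, y, current)
  | line :: rest, pages, y, current =>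
    if y < 50 then
      buildLoopA rest (pages ++ [current]) (842 - 50 - 14) [pvFmt line (842 - 50)]
    else
      buildLoopA rest pages (y - 14) (current ++ [pvFmt line y])

def build_pages (lines : List String) : List (List String) :=
  let r := buildLoopA lines [] (842 - 50) []
  if r.2.2 ≠ [] then r.1 ++ [r.2.2] else r.1

-- ===== PORT B =====
-- render one chunk: y = top - i*LINE_HEIGHT for the i-th line of the chunk
def renderChunk (chunk : List String) : List String :=
  (PySem.List.enumerate chunk).map (fun p => pvFmt p.2 (842 - 50 - 14 * p.1))

-- slice into consecutive chunks of capacity 54 = (842 - 2*50)//14 + 1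
def build_pages_alt : List String → List (List String)
  | [] => []
  | l :: rest => renderChunk (l :: rest.take 53) :: build_pages_alt (rest.drop 53)
  termination_by ls => ls.length
  decreasing_by simp

-- ===== PRECONDITION & SPEC =====
def Spec_build_pages (lines : List String) (out : List (List String)) : Prop := out = build_pages_alt lines
instance (lines : List String) (out : List (List String)) : Decidable (Spec_build_pages lines out) := by unfold Spec_build_pages; infer_instance

-- ===== CLAIM (what is proved, stated in full; the proofs are below) =====
def Claim_equal_build_pages : Prop := ∀ (lines : List String), Dom_build_pages lines → Spec_build_pages lines (build_pages lines)

-- ===== LEMMAS AND PROOFS =====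

def finishA (r : List (List String) × Int × List String) : List (List String) :=
  if r.2.2 ≠ [] then r.1 ++ [r.2.2] else r.1

theorem alt_nil : build_pages_alt [] = [] := by
  rw [build_pages_alt]

theorem alt_cons (l : String) (rest : List String) :
    build_pages_alt (l :: rest) =
      renderChunk (l :: rest.take 53) :: build_pages_alt (rest.drop 53) := by
  rw [build_pages_alt]

theorem alt_eq (ls : List String) (h : ls ≠ []) :
    build_pages_alt ls = renderChunk (ls.take 54) :: build_pages_alt (ls.drop 54) := by
  cases ls with
  | nil => exact absurd rfl h
  | cons l rest => simp [alt_cons]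

theorem renderChunk_nil : renderChunk [] = [] := by
  simp [renderChunk, PySem.List.enumerate]

theorem renderChunk_eq_nil_iff (chunk : List String) : renderChunk chunk = [] ↔ chunk = [] := by
  cases chunk with
  | nil => simp [renderChunk_nil]
  | cons c cs => simp [renderChunk, PySem.List.enumerate_cons]

theorem renderChunk_snoc (chunk : List String) (l : String) :
    renderChunk (chunk ++ [l]) =
      renderChunk chunk ++ [pvFmt l (842 - 50 - 14 * (chunk.length : Int))] := by
  simp [renderChunk, PySem.List.enumerate_append, PySem.List.enumerate_cons,
    PySem.List.enumerate_nil]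

theorem key (ls : List String) : ∀ (chunk : List String) (pages : List (List String)),
    chunk.length ≤ 54 →
    finishA (buildLoopA ls pages (842 - 50 - 14 * (chunk.length : Int)) (renderChunk chunk)) =
      pages ++ build_pages_alt (chunk ++ ls) := by
  induction ls with
  | nil =>
    intro chunk pages h
    cases chunk with
    | nil => simp [buildLoopA, finishA, renderChunk_nil, alt_nil]
    | cons c cs =>
      have hne : renderChunk (c :: cs) ≠ [] := by
        simp [renderChunk_eq_nil_iff]
      simp only [buildLoopA, finishA, List.append_nil, if_pos hne]
      rw [alt_eq (c :: cs) (by simp)]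
      have h53 : cs.length ≤ 53 := by simp at h; omega
      simp [alt_nil, List.take_of_length_le h53, List.drop_of_length_le h53]
  | cons l rest ih =>
    intro chunk pages h
    by_cases hfull : chunk.length = 54
    · have hy : (842 - 50 - 14 * (chunk.length : Int)) < 50 := by
        rw [hfull]; norm_num
      rw [buildLoopA, if_pos hy]
      have h1 : [pvFmt l (842 - 50)] = renderChunk [l] := by
        simp [renderChunk, PySem.List.enumerate_cons, PySem.List.enumerate_nil]
      have h2 : (842 - 50 - 14 : Int) = 842 - 50 - 14 * (([l] : List String).length : Int) := by
        simp
      rw [h1, h2, ih [l] (pages ++ [renderChunk chunk]) (by simp)]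
      rw [alt_eq (chunk ++ l :: rest) (by simp)]
      have ht : (chunk ++ l :: rest).take 54 = chunk := by
        rw [← hfull]; exact List.take_left
      have hd : (chunk ++ l :: rest).drop 54 = l :: rest := by
        rw [← hfull]; exact List.drop_left
      rw [ht, hd]
      simp
    · have hlt : chunk.length < 54 := lt_of_le_of_ne h hfull
      have hy : ¬ (842 - 50 - 14 * (chunk.length : Int)) < 50 := by
        have : (chunk.length : Int) ≤ 53 := by exact_mod_cast Nat.lt_succ_iff.mp hlt
        omega
      rw [buildLoopA, if_neg hy]
      have h2 : (842 - 50 - 14 * (chunk.length : Int) - 14)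
          = 842 - 50 - 14 * (((chunk ++ [l]).length : Int)) := by
        simp; ring
      have h1 : renderChunk chunk ++ [pvFmt l (842 - 50 - 14 * (chunk.length : Int))]
          = renderChunk (chunk ++ [l]) := (renderChunk_snoc chunk l).symm
      rw [h1, h2, ih (chunk ++ [l]) pages (by simpa using hlt)]
      simp

-- ===== VERDICT (by name: the statement is the Claim_ definition above) =====
theorem build_pages_spec : Claim_equal_build_pages := by
  intro lines _
  show build_pages lines = build_pages_alt lines
  have h := key lines [] [] (by simp)
  simpa [finishA, renderChunk_nil, build_pages] using h
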